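-- pv_equiv track=rewrite | github.com/red-hat-storage/ocs-ci | ocs_ci/ocs/resources/bucket_logging_manager.py | verify_logs_integrity
-- ===== SOURCE A (Python) =====
-- def verify_logs_integrity(logs, expected_ops, check_intent=False):
--     """
--     Check whether all the expected operations are present in the logs,
--     including intent logs if specified.
--
--     Note that this implementation assumes that each operation was only
--     made once.
--
--     Args:
--         logs (list): A list of dicts, deserialized from the JSON logs
--         expected_ops (list): A list of tuples representing operations.
--                             I.E [('PUT', 'object1'), ('GET', 'object2')]
--         check_intent (bool): Whether to check for intent logs
--
--     Returns:
--         bool: True if all the expected operations are present, False otherwise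
--     """
--     # Convert the input into sets of strings with
--     # unified operation-object-success_code format
--     expected_ops_set = set()
--     for op, obj in expected_ops:
--         success_code = "200" if op != "DELETE" else "204"
--         expected_ops_set.add(f"{op}-{obj}-{success_code}")
--
--     # The http_status field is 102 for intent logs
--     if check_intent:
--         for op, obj in expected_ops:
--             expected_ops_set.add(f"{op}-{obj}-102")
--
--     # Parse the logs into a set of strings with the same format
--     logs_set = {
--         f"{log['op']}-{log['object_key']}-{log['http_status']}" for log in logs
--     }
--
--     return expected_ops_set.issubset(logs_set)
-- ===== SOURCE B (Python) =====
-- def verify_logs_integrity(logs, expected_ops, check_intent=False):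
--     """Worklist elimination: build the list of required log lines, then sweep the
--     logs once, deleting every requirement a log line satisfies; all expected
--     operations are present iff nothing remains."""
--     remaining = []
--     for op, obj in expected_ops:
--         remaining.append(f"{op}-{obj}-{'204' if op == 'DELETE' else '200'}")
--         if check_intent:
--             remaining.append(f"{op}-{obj}-102")
--     for log in logs:
--         line = f"{log['op']}-{log['object_key']}-{log['http_status']}"
--         remaining = [r for r in remaining if r != line]
--     return not remaining
-- ===== Notes on version B (the rewrite author's own statement) =====
-- stated objective: alternative
-- what changed: Inverted the traversal: instead of building two sets and testing subset, B builds a worklist of required formatted log lines and makes the LOGS the outer loop, each log line eliminating the requirements it satisfies, returning whether the worklist ends empty; no set, no subset test, no per-expected scan of the logs.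
import Mathlib
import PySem

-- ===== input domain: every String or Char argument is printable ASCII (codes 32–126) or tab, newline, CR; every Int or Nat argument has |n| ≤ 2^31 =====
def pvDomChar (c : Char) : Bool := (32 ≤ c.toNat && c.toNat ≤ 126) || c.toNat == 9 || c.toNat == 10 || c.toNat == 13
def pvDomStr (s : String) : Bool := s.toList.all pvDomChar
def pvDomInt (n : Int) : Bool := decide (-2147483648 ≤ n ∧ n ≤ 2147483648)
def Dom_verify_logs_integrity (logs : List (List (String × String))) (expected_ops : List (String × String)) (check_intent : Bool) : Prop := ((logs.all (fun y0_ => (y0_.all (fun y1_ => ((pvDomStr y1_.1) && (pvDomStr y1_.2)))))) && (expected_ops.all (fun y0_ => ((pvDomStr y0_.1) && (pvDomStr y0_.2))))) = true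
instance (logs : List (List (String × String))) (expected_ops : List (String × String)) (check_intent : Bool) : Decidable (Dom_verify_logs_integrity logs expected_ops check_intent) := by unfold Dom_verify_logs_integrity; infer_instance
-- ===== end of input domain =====

-- B inverts the traversal: a worklist of required formatted log lines is swept by
-- ONE outer loop over the logs, each log line deleting the requirements it
-- satisfies; result = worklist empty (alternative decomposition, similar cost).

-- ===== PORT A =====
-- f"{op}-{obj}-{code}"
def pvFmt (op obj code : String) : String := op ++ "-" ++ obj ++ "-" ++ code

-- log['key'] as a total function: exact wherever the key is present (Pre_);
-- Python raises KeyError on a missing key, which Pre_ excludes.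
def pvLogGet (log : List (String × String)) (k : String) : String :=
  ((PySem.Dict.mk log).get? k).getD ""

-- f"{log['op']}-{log['object_key']}-{log['http_status']}" for one log line
def pvLogStr (log : List (String × String)) : String :=
  pvFmt (pvLogGet log "op") (pvLogGet log "object_key") (pvLogGet log "http_status")

def verify_logs_integrity (logs : List (List (String × String))) (expected_ops : List (String × String)) (check_intent : Bool) : Bool :=
  -- expected_ops_set built by the first loop (success codes)
  let s1 := expected_ops.foldl
    (fun s p =>
      let success_code := if p.1 ≠ "DELETE" then "200" else "204"
      PySem.Set.add s (pvFmt p.1 p.2 success_code))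
    PySem.Set.empty
  -- second loop: intent logs have http_status 102
  let s2 := if check_intent then
      expected_ops.foldl (fun s p => PySem.Set.add s (pvFmt p.1 p.2 "102")) s1
    else s1
  -- logs_set comprehension
  let logs_set := PySem.Set.ofList (logs.map pvLogStr)
  PySem.Set.issubset s2 logs_set

-- ===== PORT B =====
def verify_logs_integrity_alt (logs : List (List (String × String))) (expected_ops : List (String × String)) (check_intent : Bool) : Bool :=
  -- build the worklist of required lines
  let remaining := expected_ops.foldl
    (fun acc p =>
      let acc := acc ++ [pvFmt p.1 p.2 (if p.1 = "DELETE" then "204" else "200")]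
      if check_intent then acc ++ [pvFmt p.1 p.2 "102"] else acc)
    []
  -- sweep the logs, each line eliminating the requirements it satisfies
  let remaining := logs.foldl
    (fun rem log => rem.filter (fun r => r ≠ pvLogStr log)) remaining
  remaining.isEmpty

-- ===== PRECONDITION & SPEC =====
-- Pre_ excludes only logs missing one of the keys 'op'/'object_key'/'http_status',
-- on which Python A raises KeyError.
def Pre_verify_logs_integrity (logs : List (List (String × String))) (expected_ops : List (String × String)) (check_intent : Bool) : Prop :=
  ∀ log ∈ logs,
    (PySem.Dict.mk log).contains "op" = true ∧
    (PySem.Dict.mk log).contains "object_key" = true ∧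
    (PySem.Dict.mk log).contains "http_status" = true
instance (logs : List (List (String × String))) (expected_ops : List (String × String)) (check_intent : Bool) : Decidable (Pre_verify_logs_integrity logs expected_ops check_intent) := by unfold Pre_verify_logs_integrity; infer_instance

def pvWitness_verify_logs_integrity : (List (List (String × String))) × (List (String × String)) × Bool :=
  ([[("op", "GET"), ("object_key", "a"), ("http_status", "200")]], [("GET", "a")], false)

def Spec_verify_logs_integrity (logs : List (List (String × String))) (expected_ops : List (String × String)) (check_intent : Bool) (out : Bool) : Prop := out = verify_logs_integrity_alt logs expected_ops check_intent
instance (logs : List (List (String × String))) (expected_ops : List (String × String)) (check_intent : Bool) (out : Bool) : Decidable (Spec_verify_logs_integrity logs expected_ops check_intent out) := by unfold Spec_verify_logs_integrity; infer_instance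

-- ===== CLAIM (what is proved, stated in full; the proofs are below) =====
def Claim_equal_verify_logs_integrity : Prop := ∀ (logs : List (List (String × String))) (expected_ops : List (String × String)) (check_intent : Bool), Dom_verify_logs_integrity logs expected_ops check_intent → Pre_verify_logs_integrity logs expected_ops check_intent → Spec_verify_logs_integrity logs expected_ops check_intent (verify_logs_integrity logs expected_ops check_intent)

-- ===== LEMMAS AND PROOFS =====

-- membership in a set built by a foldl of adds
theorem pv_mem_foldl_add {α β : Type} [BEq α] [LawfulBEq α] (f : β → α) (l : List β) :
    ∀ (s : PySem.Set α) (x : α),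
      x ∈ l.foldl (fun s b => PySem.Set.add s (f b)) s ↔ x ∈ s ∨ ∃ b ∈ l, f b = x := by
  induction l with
  | nil => intro s x; simp
  | cons a t ih =>
    intro s x
    simp only [List.foldl_cons, ih, PySem.Set.mem_add, List.mem_cons]
    constructor
    · rintro (⟨h | h⟩ | ⟨b, hb, hf⟩)
      · exact Or.inl h
      · exact Or.inr ⟨a, Or.inl rfl, h.symm⟩
      · exact Or.inr ⟨b, Or.inr hb, hf⟩
    · rintro (h | ⟨b, (rfl | hb), hf⟩)
      · exact Or.inl (Or.inl h)
      · exact Or.inl (Or.inr hf.symm)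
      · exact Or.inr ⟨b, hb, hf⟩


theorem pv_mem_build (check_intent : Bool) (l : List (String × String)) :
    ∀ (acc : List String) (x : String),
      x ∈ l.foldl
        (fun acc p =>
          let acc := acc ++ [pvFmt p.1 p.2 (if p.1 = "DELETE" then "204" else "200")]
          if check_intent then acc ++ [pvFmt p.1 p.2 "102"] else acc) acc ↔
      x ∈ acc ∨ ∃ p ∈ l,
        x = pvFmt p.1 p.2 (if p.1 = "DELETE" then "204" else "200") ∨
        (check_intent = true ∧ x = pvFmt p.1 p.2 "102") := by
  induction l with
  | nil => intro acc x; simp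
  | cons a t ih =>
    intro acc x
    rw [List.foldl_cons, ih]
    cases check_intent <;> simp [List.mem_append] <;> aesop

theorem pv_mem_sweep (logs : List (List (String × String))) :
    ∀ (rem : List String) (x : String),
      x ∈ logs.foldl (fun rem log => rem.filter (fun r => r ≠ pvLogStr log)) rem ↔
      x ∈ rem ∧ ∀ log ∈ logs, x ≠ pvLogStr log := by
  induction logs with
  | nil => intro rem x; simp
  | cons a t ih =>
    intro rem x
    rw [List.foldl_cons, ih]
    simp only [List.mem_filter, List.mem_cons, decide_not, Bool.not_eq_eq_eq_not, Bool.not_true,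
      decide_eq_false_iff_not]
    aesop

-- A's success code equals B's success code
theorem pv_code_eq (op : String) :
    (if op ≠ "DELETE" then "200" else "204") = (if op = "DELETE" then "204" else "200") := by
  by_cases h : op = "DELETE" <;> simp [h]

-- ===== VERDICT (by name: the statement is the Claim_ definition above) =====
theorem verify_logs_integrity_spec : Claim_equal_verify_logs_integrity := by
  intro logs expected_ops check_intent _ _
  unfold Spec_verify_logs_integrity
  apply Bool.eq_iff_iff.mpr
  unfold verify_logs_integrity verify_logs_integrity_alt
  simp only [List.isEmpty_iff, List.eq_nil_iff_forall_not_mem, pv_mem_sweep, pv_mem_build,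
    PySem.Set.issubset_iff, PySem.Set.mem_ofList, List.mem_map, List.not_mem_nil, false_or,
    not_and, not_forall, not_not]
  cases check_intent with
  | false =>
    simp only [Bool.false_eq_true, if_false, pv_mem_foldl_add, PySem.Set.empty,
      List.not_mem_nil, false_or, false_and, or_false]
    simp only [pv_code_eq]
    constructor
    · rintro h a ⟨p, hp, rfl⟩
      obtain ⟨l, hl, he⟩ := h _ ⟨p, hp, rfl⟩
      exact ⟨l, hl, he.symm⟩
    · rintro h x ⟨p, hp, rfl⟩
      obtain ⟨l, hl, he⟩ := h _ ⟨p, hp, rfl⟩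
      exact ⟨l, hl, he.symm⟩
  | true =>
    simp only [if_true, pv_mem_foldl_add, PySem.Set.empty, List.not_mem_nil, false_or,
      true_and]
    simp only [pv_code_eq]
    constructor
    · rintro h a ⟨p, hp, (rfl | rfl)⟩
      · obtain ⟨l, hl, he⟩ := h _ (Or.inl ⟨p, hp, rfl⟩)
        exact ⟨l, hl, he.symm⟩
      · obtain ⟨l, hl, he⟩ := h _ (Or.inr ⟨p, hp, rfl⟩)
        exact ⟨l, hl, he.symm⟩
    · rintro h x (⟨p, hp, rfl⟩ | ⟨p, hp, rfl⟩)
      · obtain ⟨l, hl, he⟩ := h _ ⟨p, hp, Or.inl rfl⟩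
        exact ⟨l, hl, he.symm⟩
      · obtain ⟨l, hl, he⟩ := h _ ⟨p, hp, Or.inr rfl⟩
        exact ⟨l, hl, he.symm⟩
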